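-- pv_equiv track=rewrite | github.com/DanniTheAsian/discrete-math | Logic/truthtable.py | remove_redundant_not
-- ===== SOURCE A (Python) =====
-- def remove_redundant_not(expression: str) -> str:
--     stack = []
--     for sub in expression.split():
--         if stack and stack[-1] == "not" and sub == "not":
--             stack.pop()
--         else:
--             stack.append(sub)
--     return " ".join(stack)
-- ===== SOURCE B (Python) =====
-- def remove_redundant_not(expression: str) -> str:
--     tokens = expression.split()
--     out = []
--     i = 0
--     n = len(tokens)
--     while i < n:
--         j = i
--         while j < n and tokens[j] == tokens[i]:
--             j += 1
--         if tokens[i] == "not":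
--             if (j - i) % 2 == 1:
--                 out.append("not")
--         else:
--             out.extend(tokens[i:j])
--         i = j
--     return " ".join(out)
-- ===== Notes on version B (the rewrite author's own statement) =====
-- stated objective: alternative
-- what changed: Replaces the stack with push/pop pairing by a run-length scan: maximal runs of equal tokens are found by index scanning, a 'not' run contributes a single 'not' iff its length is odd, any other run is copied whole.
import Mathlib
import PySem

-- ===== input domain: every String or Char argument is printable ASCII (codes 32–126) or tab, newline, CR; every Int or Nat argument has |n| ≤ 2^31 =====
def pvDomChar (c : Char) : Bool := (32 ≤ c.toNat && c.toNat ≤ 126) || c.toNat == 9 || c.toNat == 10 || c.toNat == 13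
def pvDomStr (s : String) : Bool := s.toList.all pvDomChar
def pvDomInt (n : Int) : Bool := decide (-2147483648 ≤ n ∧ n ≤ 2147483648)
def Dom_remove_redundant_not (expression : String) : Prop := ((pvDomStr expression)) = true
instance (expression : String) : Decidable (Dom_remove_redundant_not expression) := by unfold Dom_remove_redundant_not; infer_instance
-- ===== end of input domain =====

-- B replaces A's stack with a run-length scan over maximal runs of equal tokens (alternative decomposition, same cost).

-- ===== PORT A =====
-- stack-based: pop a trailing "not" when the next token is "not", else push
def remove_redundant_not (expression : String) : String :=
  let stack := (PySem.Str.split₀ expression).foldl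
    (fun stack sub =>
      if stack ≠ [] ∧ stack.getLast? = some "not" ∧ sub = "not"
      then stack.dropLast
      else stack ++ [sub]) []
  PySem.Str.join " " stack

-- ===== PORT B =====
-- the inner `while j < n and tokens[j] == tokens[i]` scan of Source B: the run is the
-- longest equal prefix (takeWhile), the loop resumes at its end (dropWhile)
def rrnLoop : List String → List String
  | [] => []
  | t :: rest =>
    let run := rest.takeWhile (· == t)
    let tail := rest.dropWhile (· == t)
    (if t = "not" then (if (run.length + 1) % 2 = 1 then ["not"] else []) else t :: run)
      ++ rrnLoop tail
termination_by l => l.length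
decreasing_by
  simp only [List.length_cons]
  have := List.length_dropWhile_le (· == t) rest
  omega

def remove_redundant_not_alt (expression : String) : String :=
  PySem.Str.join " " (rrnLoop (PySem.Str.split₀ expression))

-- ===== PRECONDITION & SPEC =====
def Spec_remove_redundant_not (expression : String) (out : String) : Prop := out = remove_redundant_not_alt expression
instance (expression : String) (out : String) : Decidable (Spec_remove_redundant_not expression out) := by unfold Spec_remove_redundant_not; infer_instance

-- ===== CLAIM (what is proved, stated in full; the proofs are below) =====
def Claim_equal_remove_redundant_not : Prop := ∀ (expression : String), Dom_remove_redundant_not expression → Spec_remove_redundant_not expression (remove_redundant_not expression)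

-- ===== LEMMAS AND PROOFS =====

-- A's fold on the reversed stack (cons/tail instead of append/dropLast)
def rrnFA : List String → List String → List String
  | r, [] => r
  | r, s :: ts =>
    if r.head? = some "not" ∧ s = "not" then rrnFA r.tail ts else rrnFA (s :: r) ts

lemma rrnFA_eq_foldl (ts : List String) : ∀ (stack : List String),
    ts.foldl (fun stack sub =>
      if stack ≠ [] ∧ stack.getLast? = some "not" ∧ sub = "not"
      then stack.dropLast else stack ++ [sub]) stack
    = (rrnFA stack.reverse ts).reverse := by
  induction ts with
  | nil => simp [rrnFA]
  | cons s ts ih =>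
    intro stack
    rw [List.foldl_cons, ih]
    rw [show rrnFA stack.reverse (s :: ts)
        = if stack.reverse.head? = some "not" ∧ s = "not"
          then rrnFA stack.reverse.tail ts else rrnFA (s :: stack.reverse) ts from rfl]
    by_cases h : stack.getLast? = some "not" ∧ s = "not"
    · have hne : stack ≠ [] := by
        intro he; rw [he] at h; simp at h
      rw [if_pos ⟨hne, h⟩, if_pos (by rw [List.head?_reverse]; exact h)]
      rw [← List.tail_reverse]
    · rw [if_neg (by tauto), if_neg (by rw [List.head?_reverse]; tauto)]
      rw [show (stack ++ [s]).reverse = s :: stack.reverse by simp]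

lemma rrnFA_push (s : String) (hs : s ≠ "not") (r ts) :
    rrnFA r (s :: ts) = rrnFA (s :: r) ts := by
  rw [show rrnFA r (s :: ts)
      = if r.head? = some "not" ∧ s = "not"
        then rrnFA r.tail ts else rrnFA (s :: r) ts from rfl]
  rw [if_neg (by tauto)]

lemma rrnFA_push_run (g : List String) (hg : ∀ x ∈ g, x ≠ "not") :
    ∀ (r ts : List String), rrnFA r (g ++ ts) = rrnFA (g.reverse ++ r) ts := by
  induction g with
  | nil => simp
  | cons x g ih =>
    intro r ts
    rw [List.cons_append, rrnFA_push x (hg x (by simp)) r (g ++ ts),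
        ih (fun y hy => hg y (by simp [hy])) (x :: r) ts]
    simp

lemma rrnFA_not_run : ∀ (m : Nat) (r ts : List String), r.head? ≠ some "not" →
    rrnFA r (List.replicate m "not" ++ ts)
    = rrnFA ((if m % 2 = 1 then ["not"] else []) ++ r) ts := by
  intro m
  induction m using Nat.strong_induction_on with
  | _ m ih =>
    match m with
    | 0 => intro r ts _; simp
    | 1 =>
      intro r ts h
      rw [show List.replicate 1 "not" ++ ts = "not" :: ts by rfl]
      rw [show rrnFA r ("not" :: ts)
          = if r.head? = some "not" ∧ "not" = "not"
            then rrnFA r.tail ts else rrnFA ("not" :: r) ts from rfl]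
      rw [if_neg (by tauto)]
      norm_num
    | (k+2) =>
      intro r ts h
      rw [show List.replicate (k+2) "not" ++ ts
          = "not" :: "not" :: (List.replicate k "not" ++ ts) by simp [List.replicate]]
      rw [show rrnFA r ("not" :: ("not" :: (List.replicate k "not" ++ ts)))
          = if r.head? = some "not" ∧ "not" = "not"
            then rrnFA r.tail ("not" :: (List.replicate k "not" ++ ts))
            else rrnFA ("not" :: r) ("not" :: (List.replicate k "not" ++ ts)) from rfl]
      rw [if_neg (by tauto)]
      rw [show rrnFA ("not" :: r) ("not" :: (List.replicate k "not" ++ ts))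
          = if ("not" :: r).head? = some "not" ∧ "not" = "not"
            then rrnFA ("not" :: r).tail (List.replicate k "not" ++ ts)
            else rrnFA ("not" :: ("not" :: r)) (List.replicate k "not" ++ ts) from rfl]
      rw [if_pos ⟨rfl, rfl⟩]
      rw [show ("not" :: r).tail = r from rfl]
      rw [ih k (by omega) r ts h]
      have : (k + 2) % 2 = k % 2 := Nat.add_mod_right k 2
      rw [this]

lemma rrn_head_dropWhile (p : String → Bool) : ∀ (l : List String) (x : String),
    (l.dropWhile p).head? = some x → p x = false := by
  intro l
  induction l with
  | nil => simp [List.dropWhile]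
  | cons a t ih =>
    intro x h
    rw [List.dropWhile_cons] at h
    split at h
    · exact ih x h
    · simp_all

lemma rrn_main_aux : ∀ (n : Nat) (ts r : List String), ts.length ≤ n →
    (r.head? = some "not" → ts.head? ≠ some "not") →
    rrnFA r ts = (rrnLoop ts).reverse ++ r := by
  intro n
  induction n with
  | zero =>
    intro ts r hn _
    have : ts = [] := List.eq_nil_of_length_eq_zero (by omega)
    subst this; simp [rrnLoop, rrnFA]
  | succ n ih =>
    intro ts r hn h
    cases ts with
    | nil => simp [rrnLoop, rrnFA]
    | cons t rest =>
      have hsplit : t :: rest = (t :: rest.takeWhile (· == t)) ++ rest.dropWhile (· == t) := by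
        rw [List.cons_append, List.takeWhile_append_dropWhile]
      have hrunall : ∀ x ∈ t :: rest.takeWhile (· == t), x = t := by
        intro x hx
        rcases List.mem_cons.mp hx with h1 | h1
        · exact h1
        · simpa using List.mem_takeWhile_imp h1
      have htlen : (rest.dropWhile (· == t)).length < (t :: rest).length := by
        have := List.length_dropWhile_le (· == t) rest
        simp only [List.length_cons]; omega
      have hloop : rrnLoop (t :: rest)
          = (if t = "not" then (if ((rest.takeWhile (· == t)).length + 1) % 2 = 1 then ["not"] else [])
             else t :: rest.takeWhile (· == t)) ++ rrnLoop (rest.dropWhile (· == t)) := by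
        rw [rrnLoop]
      by_cases ht : t = "not"
      · -- "not"-run: parity
        subst ht
        have hrep : (("not" : String) :: rest.takeWhile (· == "not"))
            = List.replicate ((rest.takeWhile (· == "not")).length + 1) "not" := by
          apply List.eq_replicate_of_mem
          intro x hx; exact hrunall x hx
        have hr : r.head? ≠ some "not" := by
          intro hc; exact h hc rfl
        rw [show rrnFA r (("not" : String) :: rest)
            = rrnFA r ((("not" : String) :: rest.takeWhile (· == "not")) ++ rest.dropWhile (· == "not")) by rw [← hsplit]]
        rw [hrep, rrnFA_not_run _ r _ hr]
        have hdh : (rest.dropWhile (· == "not")).head? = some "not" → False := by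
          intro hc
          have := rrn_head_dropWhile (· == "not") rest "not" hc
          simp at this
        rw [ih _ _ (by have := List.length_dropWhile_le (· == "not") rest; simp only [List.length_cons] at hn; omega) (fun _ hc => hdh hc)]
        rw [hloop, if_pos rfl]
        by_cases hp : ((rest.takeWhile (· == "not")).length + 1) % 2 = 1
        · simp [hp]
        · simp [hp]
      · -- non-"not" run: push the whole run
        have hall : ∀ x ∈ t :: rest.takeWhile (· == t), x ≠ "not" := by
          intro x hx; rw [hrunall x hx]; exact ht
        rw [show rrnFA r (t :: rest)
            = rrnFA r ((t :: rest.takeWhile (· == t)) ++ rest.dropWhile (· == t)) by rw [← hsplit]]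
        rw [rrnFA_push_run _ hall r _]
        have hr' : ((t :: rest.takeWhile (· == t)).reverse ++ r).head? = some "not" → False := by
          intro hc
          have hne : (t :: rest.takeWhile (· == t)).reverse ≠ [] := by simp
          rw [List.head?_append_of_ne_nil _ hne] at hc
          rw [List.head?_reverse] at hc
          have hmem : ("not" : String) ∈ t :: rest.takeWhile (· == t) :=
            List.mem_of_getLast? hc
          exact hall _ hmem rfl
        rw [ih _ _ (by have := List.length_dropWhile_le (· == t) rest; simp only [List.length_cons] at hn; omega) (fun hc _ => hr' hc)]
        rw [hloop, if_neg ht]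
        simp

-- ===== VERDICT (by name: the statement is the Claim_ definition above) =====
theorem remove_redundant_not_spec : Claim_equal_remove_redundant_not := by
  unfold Claim_equal_remove_redundant_not
  intro expression _
  unfold Spec_remove_redundant_not remove_redundant_not remove_redundant_not_alt
  rw [rrnFA_eq_foldl]
  rw [show (([] : List String)).reverse = [] from rfl]
  rw [rrn_main_aux (PySem.Str.split₀ expression).length (PySem.Str.split₀ expression) [] le_rfl (by simp)]
  simp
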